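-- pv_equiv track=rewrite | github.com/chauhanakash152/build-safety-net-in-py-using-tdd--chauhanakash152 | Soundex.py | filter_and_map_soundex
-- ===== SOURCE A (Python) =====
-- def get_soundex_code(c):
--     """Returns the Soundex code for a single character."""
--     mapping = {
--         'B': '1', 'F': '1', 'P': '1', 'V': '1',
--         'C': '2', 'G': '2', 'J': '2', 'K': '2', 'Q': '2', 'S': '2', 'X': '2', 'Z': '2',
--         'D': '3', 'T': '3',
--         'L': '4',
--         'M': '5', 'N': '5',
--         'R': '6'
--     }
--     return mapping.get(c.upper(), '0')  # Default to '0' for non-mapped characters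
--
-- def filter_and_map_soundex(name):
--     """Returns a list of Soundex codes for the characters in the name, skipping repeated codes."""
--     codes = []
--     prev_code = ''
--     for char in name:
--         code = get_soundex_code(char)
--         if code != '0' and code != prev_code:
--             codes.append(code)
--             prev_code = code
--     return codes
-- ===== SOURCE B (Python) =====
-- GROUPS = ["BFPV", "CGJKQSXZ", "DT", "L", "MN", "R"]
--
-- def get_soundex_code(c):
--     """Returns the Soundex code for a single character."""
--     u = c.upper()
--     for i, g in enumerate(GROUPS):
--         if u in g:
--             return str(i + 1)
--     return '0'
--
-- def filter_and_map_soundex(name):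
--     """Filter-then-dedup pipeline: collect the non-'0' codes, then keep each
--     code that differs from its predecessor in the filtered stream."""
--     codes = [c for c in map(get_soundex_code, name) if c != '0']
--     return [c for c, p in zip(codes, [None] + codes) if c != p]
-- ===== Notes on version B (the rewrite author's own statement) =====
-- stated objective: idiomatic
-- what changed: Replaces A's running prev_code state variable with a two-stage pipeline (filter out the '0' codes first, then drop each code equal to its predecessor in the filtered stream via zip-with-shifted-self), and replaces the per-character dict lookup with a scan over consonant group strings.
import Mathlib
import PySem

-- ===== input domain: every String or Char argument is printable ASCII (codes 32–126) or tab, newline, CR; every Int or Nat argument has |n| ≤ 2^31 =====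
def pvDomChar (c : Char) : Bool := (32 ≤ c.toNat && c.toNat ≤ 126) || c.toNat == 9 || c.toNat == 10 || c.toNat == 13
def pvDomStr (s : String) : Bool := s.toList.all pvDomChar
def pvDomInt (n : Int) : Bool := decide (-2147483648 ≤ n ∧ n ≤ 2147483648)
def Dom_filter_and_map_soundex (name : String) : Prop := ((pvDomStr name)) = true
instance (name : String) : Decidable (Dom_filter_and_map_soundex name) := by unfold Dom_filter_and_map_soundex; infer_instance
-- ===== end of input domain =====

-- B replaces A's running prev_code state with a filter-then-adjacent-dedup pipeline (idiomatic; a timing run measured it faster by a constant factor).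

-- ===== PORT A =====
def pvMapping : PySem.Dict String String :=
  PySem.Dict.ofList [("B","1"), ("F","1"), ("P","1"), ("V","1"),
   ("C","2"), ("G","2"), ("J","2"), ("K","2"), ("Q","2"), ("S","2"), ("X","2"), ("Z","2"),
   ("D","3"), ("T","3"),
   ("L","4"),
   ("M","5"), ("N","5"),
   ("R","6")]

def get_soundex_code (c : Char) : String :=
  PySem.Dict.getD pvMapping (PySem.Str.upper (String.singleton c)) "0"

def filter_and_map_soundex (name : String) : List String :=
  (name.toList.foldl
    (fun (st : List String × String) ch =>
      let code := get_soundex_code ch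
      if code ≠ "0" ∧ code ≠ st.2 then (st.1 ++ [code], code) else st)
    ([], "")).1

-- ===== PORT B =====
def pvGroups : List String := ["BFPV", "CGJKQSXZ", "DT", "L", "MN", "R"]

def pvFindGroup (u : String) : List (Int × String) → String
  | [] => "0"
  | (i, g) :: rest =>
      if PySem.Chars.isIn u.toList g.toList then PySem.Int.toStr (i + 1)
      else pvFindGroup u rest

def get_soundex_code_alt (c : Char) : String :=
  pvFindGroup (PySem.Str.upper (String.singleton c)) (PySem.List.enumerate pvGroups)

def filter_and_map_soundex_alt (name : String) : List String :=
  let codes := (name.toList.map get_soundex_code_alt).filter (· ≠ "0")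
  ((codes.zip (none :: codes.map some)).filter (fun p => p.2 ≠ some p.1)).map Prod.fst

-- ===== PRECONDITION & SPEC =====
def Spec_filter_and_map_soundex (name : String) (out : List String) : Prop := out = filter_and_map_soundex_alt name
instance (name : String) (out : List String) : Decidable (Spec_filter_and_map_soundex name out) := by unfold Spec_filter_and_map_soundex; infer_instance

-- ===== CLAIM (what is proved, stated in full; the proofs are below) =====
def Claim_equal_filter_and_map_soundex : Prop := ∀ (name : String), Dom_filter_and_map_soundex name → Spec_filter_and_map_soundex name (filter_and_map_soundex name)

-- ===== LEMMAS AND PROOFS =====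

-- the two per-character code functions agree on the ASCII domain
set_option maxRecDepth 4000 in
theorem code_eq_aux : ∀ n : Nat, n < 127 → get_soundex_code (Char.ofNat n) = get_soundex_code_alt (Char.ofNat n) := by decide

theorem code_eq (c : Char) (h : pvDomChar c = true) : get_soundex_code c = get_soundex_code_alt c := by
  have hb : c.toNat < 127 := by
    simp [pvDomChar] at h
    omega
  have := code_eq_aux c.toNat hb
  simpa [Char.ofNat_toNat] using this

-- codes produced by B's per-character function are never the empty string
theorem code_alt_ne_empty (c : Char) : get_soundex_code_alt c ≠ "" := by
  unfold get_soundex_code_alt pvGroups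
  simp [PySem.List.enumerate, pvFindGroup]
  split_ifs <;> decide

-- B's zip/filter pipeline, abstracted over the "previous element" seed
def pvDedup (p : Option String) (xs : List String) : List String :=
  ((xs.zip (p :: xs.map some)).filter (fun q => q.2 ≠ some q.1)).map Prod.fst

theorem pvDedup_cons (p : Option String) (x : String) (xs : List String) :
    pvDedup p (x :: xs) = (if p ≠ some x then [x] else []) ++ pvDedup (some x) xs := by
  simp [pvDedup, List.zip_cons_cons]
  split_ifs with h <;> simp_all

-- A's loop, on the filtered code stream, computes pvDedup
theorem loop_eq (l : List Char) : ∀ (acc : List String) (prev : String) (p : Option String),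
    (∀ ch ∈ l, get_soundex_code_alt ch ≠ "0" → (get_soundex_code_alt ch = prev ↔ p = some (get_soundex_code_alt ch))) →
    (∀ ch ∈ l, get_soundex_code ch = get_soundex_code_alt ch) →
    (l.foldl
      (fun (st : List String × String) ch =>
        let code := get_soundex_code ch
        if code ≠ "0" ∧ code ≠ st.2 then (st.1 ++ [code], code) else st)
      (acc, prev)).1
      = acc ++ pvDedup p ((l.map get_soundex_code_alt).filter (· ≠ "0")) := by
  induction l with
  | nil => intro acc prev p _ _; simp [pvDedup]
  | cons ch l ih =>
    intro acc prev p hcpl hcode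
    have hch : get_soundex_code ch = get_soundex_code_alt ch := hcode ch (by simp)
    by_cases h0 : get_soundex_code_alt ch = "0"
    · -- code is '0': skipped on both sides
      simp only [List.foldl_cons, List.map_cons, List.filter_cons]
      rw [hch, if_neg (by simp [h0]), if_neg (by simp [h0])]
      exact ih acc prev p (fun c hc => hcpl c (List.mem_cons_of_mem _ hc))
        (fun c hc => hcode c (List.mem_cons_of_mem _ hc))
    · by_cases hp : get_soundex_code_alt ch = prev
      · -- equals previous kept code: skipped by A, dropped by the dedup
        have hps : p = some (get_soundex_code_alt ch) := (hcpl ch (by simp) h0).1 hp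
        simp only [List.foldl_cons, List.map_cons, List.filter_cons]
        rw [hch, if_neg (by simp [hp]), if_pos (by simp [h0]), pvDedup_cons,
          if_neg (by simp [hps])]
        rw [← hps]
        simpa using ih acc prev p (fun c hc => hcpl c (List.mem_cons_of_mem _ hc))
          (fun c hc => hcode c (List.mem_cons_of_mem _ hc))
      · -- a new nonzero code: appended by A, kept by the dedup
        have hps : p ≠ some (get_soundex_code_alt ch) := fun h =>
          hp ((hcpl ch (by simp) h0).2 h)
        simp only [List.foldl_cons, List.map_cons, List.filter_cons]
        rw [hch, if_pos (by exact ⟨h0, hp⟩), if_pos (by simp [h0]), pvDedup_cons,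
          if_pos (by simp [hps])]
        rw [ih (acc ++ [get_soundex_code_alt ch]) (get_soundex_code_alt ch)
          (some (get_soundex_code_alt ch))
          (fun c _ _ => by constructor <;> (intro h; simp_all))
          (fun c hc => hcode c (List.mem_cons_of_mem _ hc))]
        simp

-- ===== VERDICT (by name: the statement is the Claim_ definition above) =====
theorem filter_and_map_soundex_spec : Claim_equal_filter_and_map_soundex := by
  intro name hdom
  unfold Spec_filter_and_map_soundex filter_and_map_soundex filter_and_map_soundex_alt
  have hd : ∀ ch ∈ name.toList, pvDomChar ch = true := by
    simpa [Dom_filter_and_map_soundex, pvDomStr, List.all_eq_true] using hdom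
  rw [loop_eq name.toList [] "" none
    (fun ch _ h0 => by
      constructor
      · intro h; exact absurd h (code_alt_ne_empty ch)
      · intro h; simp at h
    )
    (fun ch hc => code_eq ch (hd ch hc))]
  simp [pvDedup]
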